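-- pv_equiv track=rewrite | github.com/zih2o/Algorithm-Study | programmers/pccp/wonhyeok/외톨이 알파벳.py | solution
-- ===== SOURCE A (Python) =====
-- def solution(input_string):
--     alphabet = (chr(code) for code in range(97,123))
--     answer = ''
--
--     for char in alphabet:
--         first_idx = input_string.find(char)
--         if first_idx == -1:
--             continue
--         else:
--             last_idx = first_idx
--             for idx in range(first_idx+1, len(input_string)):
--                 next_idx = input_string.find(char, idx)
--                 if next_idx == -1:
--                     break
--                 elif next_idx == last_idx +1:
--                     last_idx = next_idx
--                 else:
--                     answer += char
--                     break
--
--     if answer == '':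
--         answer = 'N'
--
--     return answer
-- ===== SOURCE B (Python) =====
-- def solution(input_string):
--     last = {}
--     lonely = set()
--     for i, ch in enumerate(input_string):
--         if ch in last and last[ch] != i - 1:
--             lonely.add(ch)
--         last[ch] = i
--     ans = ''.join(ch for ch in map(chr, range(97, 123)) if ch in lonely)
--     return ans if ans else 'N'
-- ===== Notes on version B (the rewrite author's own statement) =====
-- stated objective: faster
-- what changed: Replaces the per-letter rescans (find in a loop over every index, for each of 26 letters) by one single pass over the string that records each character's last index and flags a non-adjacent reoccurrence, then emits flagged letters a-z.
import Mathlib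
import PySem

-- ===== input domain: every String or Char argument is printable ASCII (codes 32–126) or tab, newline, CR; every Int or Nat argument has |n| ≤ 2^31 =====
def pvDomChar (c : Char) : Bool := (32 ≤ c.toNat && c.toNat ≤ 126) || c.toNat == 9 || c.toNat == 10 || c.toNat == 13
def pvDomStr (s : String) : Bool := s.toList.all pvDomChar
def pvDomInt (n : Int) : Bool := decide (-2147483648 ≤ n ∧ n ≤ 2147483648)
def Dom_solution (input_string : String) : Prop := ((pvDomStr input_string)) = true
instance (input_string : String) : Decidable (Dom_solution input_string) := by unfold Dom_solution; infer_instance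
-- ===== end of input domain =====

-- B replaces A's per-letter rescans of the string by one single pass that tracks each
-- character's last index and flags non-adjacent reoccurrences (objective: faster).

-- ===== PORT A =====
-- inner 'for idx in range(first_idx+1, len(input_string))' loop with its breaks:
-- returns true iff the loop hit 'answer += char' (both break paths return directly).
def solutionInner (s : String) (c : Char) : List Int → Int → Bool
  | [], _ => false
  | idx :: rest, last_idx =>
      let next_idx := PySem.Str.findFrom s (String.singleton c) idx none
      if next_idx = -1 then false
      else if next_idx = last_idx + 1 then solutionInner s c rest next_idx
      else true

def solution (input_string : String) : String :=
  -- alphabet = (chr(code) for code in range(97,123)); chr is exact on these code points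
  let alphabet := (PySem.List.pyRange 97 123 1).map (fun code => Char.ofNat code.toNat)
  -- answer is a Python str built by '+='; tracked as its character list, returned via String.ofList
  let answer := alphabet.foldl (fun answer char =>
    let first_idx := PySem.Str.find input_string (String.singleton char)
    if first_idx = -1 then answer
    else if solutionInner input_string char
            (PySem.List.pyRange (first_idx + 1) (PySem.Str.len input_string) 1) first_idx
      then answer ++ [char] else answer) ([] : List Char)
  if answer = [] then "N" else String.ofList answer

-- ===== PORT B =====
-- one step of B's loop body: flag ch lonely if it reoccurs non-adjacently, record its index
def solutionAltStep (st : PySem.Dict Char Int × PySem.Set Char) (p : Int × Char) :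
    PySem.Dict Char Int × PySem.Set Char :=
  let lonely := match PySem.Dict.get? st.1 p.2 with
    | some j => if j = p.1 - 1 then st.2 else PySem.Set.add st.2 p.2
    | none => st.2
  (PySem.Dict.insert st.1 p.2 p.1, lonely)

def solution_alt (input_string : String) : String :=
  let st := (PySem.List.enumerate input_string.toList 0).foldl solutionAltStep
    (PySem.Dict.empty, PySem.Set.empty)
  -- ans = ''.join(ch for ch in map(chr, range(97,123)) if ch in lonely); built as a char list
  let ans := ((PySem.List.pyRange 97 123 1).map (fun code => Char.ofNat code.toNat)).filter
    (fun ch => PySem.Set.contains st.2 ch)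
  if ans = [] then "N" else String.ofList ans

-- ===== PRECONDITION & SPEC =====
def Spec_solution (input_string : String) (out : String) : Prop := out = solution_alt input_string
instance (input_string : String) (out : String) : Decidable (Spec_solution input_string out) := by unfold Spec_solution; infer_instance

-- ===== CLAIM (what is proved, stated in full; the proofs are below) =====
def Claim_equal_solution : Prop := ∀ (input_string : String), Dom_solution input_string → Spec_solution input_string (solution input_string)

-- ===== LEMMAS AND PROOFS =====

-- common specification of 'letter c is lonely in l': after the first maximal run of c's, c occurs again
def loneSpec (c : Char) (l : List Char) : Bool :=
  ((l.dropWhile (fun x => !(x == c))).dropWhile (fun x => x == c)).contains c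

-- per-character automaton: the projection of B's (dict, set) state onto one character c
def stepc (c : Char) (st : Option Int × Bool) (p : Int × Char) : Option Int × Bool :=
  if p.2 = c then
    (some p.1, st.2 || (match st.1 with | some j => decide (j ≠ p.1 - 1) | none => false))
  else st

lemma singleton_prefix_iff (c : Char) (t : List Char) : [c] <+: t ↔ t.head? = some c := by
  cases t with
  | nil => simp
  | cons h r => simp [List.cons_prefix_cons, eq_comm]

lemma mem_iff_find_ne (c : Char) (l : List Char) :
    PySem.Chars.find l [c] = -1 ↔ c ∉ l := by
  rw [PySem.Chars.find_eq_neg_one_iff]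
  constructor
  · intro h hm
    obtain ⟨s, t, rfl⟩ := List.append_of_mem hm
    exact h ⟨s, t, by simp⟩
  · intro h hinf
    exact h (hinf.subset (by simp))

lemma dropWhile_ne_eq_drop (c : Char) (k : Nat) (l : List Char)
    (hc : l[k]? = some c) (hmin : ∀ i, i < k → l[i]? ≠ some c) :
    l.dropWhile (fun x => !(x == c)) = l.drop k := by
  induction k generalizing l with
  | zero =>
    cases l with
    | nil => simp at hc
    | cons h t =>
      simp at hc
      subst hc
      simp
  | succ k ih =>
    cases l with
    | nil => simp at hc
    | cons h t =>
      have hh : h ≠ c := by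
        intro h0; exact hmin 0 (Nat.succ_pos k) (by simp [h0])
      simp only [List.getElem?_cons_succ] at hc
      rw [List.dropWhile_cons, if_pos (by simpa using hh)]
      simp only [List.drop_succ_cons]
      exact ih t hc (fun i hi => by
        have := hmin (i+1) (by omega); simpa using this)

-- A's inner loop, entered with last_idx = k and s[k] = c, detects an occurrence of c
-- beyond the contiguous run of c's that starts at position k+1
lemma innerA_eq (s : String) (c : Char) : ∀ (m k : Nat), m = s.toList.length - (k + 1) →
    solutionInner s c (PySem.List.pyRange ((k : Int) + 1) (PySem.Str.len s) 1) (k : Int)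
      = ((s.toList.drop (k + 1)).dropWhile (fun x => x == c)).contains c := by
  have hLL : s.toList.length = s.length := by simp
  intro m
  induction m with
  | zero =>
    intro k hm
    have hlen : s.toList.length ≤ k + 1 := by omega
    rw [PySem.List.pyRange_one_eq_nil (by simp; omega)]
    rw [List.drop_eq_nil_of_le hlen]
    simp [solutionInner]
  | succ m ih =>
    intro k hm
    have hlt : k + 1 < s.toList.length := by omega
    rw [PySem.List.pyRange_one_cons (by simp; omega)]
    rw [solutionInner]
    have hff : PySem.Str.findFrom s (String.singleton c) ((k : Int) + 1) none
        = if PySem.Chars.find (s.toList.drop (k+1)) [c] = -1 then -1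
          else ((k:Nat)+1 : Nat) + PySem.Chars.find (s.toList.drop (k+1)) [c] := by
      have := PySem.Chars.findFrom_natCast s.toList [c] (k+1) (le_of_lt hlt)
      simp only [PySem.Str.findFrom_eq, String.toList_singleton]
      push_cast at this ⊢
      exact this
    by_cases hF : PySem.Chars.find (s.toList.drop (k+1)) [c] = -1
    · rw [hff, if_pos hF]
      have hnm : c ∉ s.toList.drop (k+1) := (mem_iff_find_ne c _).mp hF
      have : c ∉ (s.toList.drop (k+1)).dropWhile (fun x => x == c) :=
        fun hmem => hnm ((List.dropWhile_sublist _).subset hmem)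
      simp [this]
    · have hF0 : 0 ≤ PySem.Chars.find (s.toList.drop (k+1)) [c] := by
        rcases (PySem.Chars.neg_one_le_find (s.toList.drop (k+1)) [c]).lt_or_eq with h | h
        · omega
        · exact absurd h.symm hF
      rcases eq_or_lt_of_le hF0 with hFz | hFp
      · -- first occurrence right at k+1: adjacent, the loop continues
        rw [hff, if_neg hF, ← hFz]
        simp only [add_zero]
        rw [if_neg (by push_cast; omega)]
        rw [if_pos (by push_cast; ring)]
        have hhead : (s.toList.drop (k+1)).head? = some c := by
          have hsp := (PySem.Chars.find_spec (le_of_eq hFz)).1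
          rw [← hFz] at hsp
          simpa [singleton_prefix_iff] using hsp
        have hdrop : s.toList.drop (k+1) = c :: s.toList.drop (k+2) := by
          rw [List.drop_eq_getElem_cons hlt]
          have : s.toList[k+1] = c := by
            have := List.getElem?_eq_getElem hlt (l := s.toList)
            rw [← List.head?_drop] at this
            rw [hhead] at this
            exact (Option.some.injEq _ _).mp this.symm
          rw [this]
        have := ih (k+1) (by omega)
        push_cast at this ⊢
        rw [this]
        rw [hdrop]
        simp
      · -- first occurrence strictly later: lonely, break with true
        rw [hff, if_neg hF]
        rw [if_neg (by push_cast; omega)]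
        rw [if_neg (by push_cast; omega)]
        have hmem : c ∈ s.toList.drop (k+1) := by
          by_contra hnm
          exact hF ((mem_iff_find_ne c _).mpr hnm)
        have hhead : ¬ [c] <+: s.toList.drop (k+1) := by
          have hsp := (PySem.Chars.find_spec hF0).2
          have := hsp 0 (by omega)
          simpa using this
        have hh : (s.toList.drop (k+1)).head? ≠ some c := by
          rw [singleton_prefix_iff] at hhead; exact hhead
        cases hd : s.toList.drop (k+1) with
        | nil => simp [hd] at hmem
        | cons h t =>
          rw [hd] at hh hmem
          have hnc : ¬ h = c := by
            simp only [List.head?_cons, ne_eq, Option.some.injEq] at hh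
            exact hh
          have hmem' : c ∈ t := by
            rcases List.mem_cons.mp hmem with e | e
            · exact absurd e.symm hnc
            · exact e
          simp [hnc, hmem']

-- A's whole per-letter body computes loneSpec
lemma charA_eq (s : String) (c : Char) :
    (if PySem.Str.find s (String.singleton c) = -1 then false
     else solutionInner s c
        (PySem.List.pyRange (PySem.Str.find s (String.singleton c) + 1) (PySem.Str.len s) 1)
        (PySem.Str.find s (String.singleton c)))
    = loneSpec c s.toList := by
  have hfind : PySem.Str.find s (String.singleton c) = PySem.Chars.find s.toList [c] := by
    simp
  by_cases hF : PySem.Chars.find s.toList [c] = -1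
  · rw [if_pos (by rw [hfind]; exact hF)]
    have hnm : c ∉ s.toList := (mem_iff_find_ne c _).mp hF
    have h1 : c ∉ (s.toList.dropWhile (fun x => !(x == c))).dropWhile (fun x => x == c) :=
      fun hm => hnm ((List.dropWhile_sublist _).subset
        ((List.dropWhile_sublist _).subset hm))
    simp [loneSpec, h1]
  · rw [if_neg (by rw [hfind]; exact hF)]
    have hF0 : 0 ≤ PySem.Chars.find s.toList [c] := by
      rcases (PySem.Chars.neg_one_le_find s.toList [c]).lt_or_eq with h | h
      · omega
      · exact absurd h.symm hF
    set k : Nat := (PySem.Chars.find s.toList [c]).toNat with hk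
    have hkc : PySem.Chars.find s.toList [c] = (k : Int) := by omega
    have hsp := PySem.Chars.find_spec hF0
    have hocc : s.toList[k]? = some c := by
      have := hsp.1
      rw [← List.head?_drop, ← singleton_prefix_iff]
      exact this
    have hmin : ∀ i, i < k → s.toList[i]? ≠ some c := by
      intro i hi
      have := hsp.2 i hi
      rw [singleton_prefix_iff, List.head?_drop] at this
      exact this
    have hklt : k < s.toList.length := by
      by_contra h
      rw [List.getElem?_eq_none (by omega)] at hocc
      cases hocc
    rw [hfind, hkc]
    rw [innerA_eq s c (s.toList.length - (k+1)) k rfl]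
    unfold loneSpec
    rw [dropWhile_ne_eq_drop c k s.toList hocc hmin]
    have hdrop : s.toList.drop k = c :: s.toList.drop (k+1) := by
      rw [List.drop_eq_getElem_cons hklt]
      have : s.toList[k] = c := by
        have := List.getElem?_eq_getElem hklt (l := s.toList)
        rw [this] at hocc
        exact (Option.some.injEq _ _).mp hocc
      rw [this]
    rw [hdrop]
    simp

lemma foldl_ite_append (p : Char → Bool) (L acc : List Char) :
    L.foldl (fun ans ch => if p ch then ans ++ [ch] else ans) acc = acc ++ L.filter p := by
  induction L generalizing acc with
  | nil => simp
  | cons h t ih =>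
    simp only [List.foldl_cons, List.filter_cons]
    by_cases hp : p h = true
    · simp [hp, ih]
    · simp [hp, ih]

lemma projB (c : Char) (ps : List (Int × Char)) : ∀ (d : PySem.Dict Char Int) (st : PySem.Set Char),
    ((ps.foldl solutionAltStep (d, st)).1.get? c,
     PySem.Set.contains (ps.foldl solutionAltStep (d, st)).2 c)
    = ps.foldl (stepc c) (d.get? c, PySem.Set.contains st c) := by
  induction ps with
  | nil => intro d st; rfl
  | cons p ps ih =>
    intro d st
    obtain ⟨i, ch⟩ := p
    simp only [List.foldl_cons]
    rw [show solutionAltStep (d, st) (i, ch) =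
      ((d.insert ch i), (match d.get? ch with
        | some j => if j = i - 1 then st else PySem.Set.add st ch
        | none => st)) from rfl]
    rw [ih]
    congr 1
    by_cases hc : ch = c
    · subst hc
      rw [show stepc ch (d.get? ch, PySem.Set.contains st ch) (i, ch) =
        (some i, PySem.Set.contains st ch ||
          (match d.get? ch with | some j => decide (j ≠ i - 1) | none => false)) by simp [stepc]]
      rw [PySem.Dict.get?_insert_self]
      congr 1
      cases hd : d.get? ch with
      | none => simp
      | some j =>
        by_cases hj : j = i - 1
        · simp [hj]
        · simp only [if_neg hj]
          simp [PySem.Set.contains, PySem.Set.mem_add, hj]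
    · rw [show stepc c (d.get? c, PySem.Set.contains st c) (i, ch) =
        (d.get? c, PySem.Set.contains st c) by simp [stepc, hc]]
      rw [PySem.Dict.get?_insert_of_ne _ _ (Ne.symm hc)]
      congr 1
      cases hd : d.get? ch with
      | none => rfl
      | some j =>
        by_cases hj : j = i - 1
        · simp [hj]
        · simp only [if_neg hj]
          simp [PySem.Set.contains, PySem.Set.mem_add, Ne.symm hc]

-- the per-character automaton computes loneSpec: states none / fresh (last = i-1) / stale (last < i-1)
lemma auto_spec (c : Char) (l : List Char) : ∀ (i : Int) (flag : Bool),
    (((PySem.List.enumerate l i).foldl (stepc c) (none, flag)).2 = (flag || loneSpec c l))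
  ∧ (((PySem.List.enumerate l i).foldl (stepc c) (some (i - 1), flag)).2
      = (flag || (l.dropWhile (fun x => x == c)).contains c))
  ∧ (∀ j : Int, j < i - 1 →
      ((PySem.List.enumerate l i).foldl (stepc c) (some j, flag)).2 = (flag || l.contains c)) := by
  induction l with
  | nil => intro i flag; simp [PySem.List.enumerate_nil, loneSpec]
  | cons h t ih =>
    intro i flag
    rw [PySem.List.enumerate_cons]
    by_cases hc : h = c
    · subst hc
      refine ⟨?_, ?_, ?_⟩
      · rw [List.foldl_cons, show stepc h (none, flag) (i, h) = (some ((i+1)-1), flag) by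
          simp [stepc], (ih (i+1) flag).2.1]
        simp [loneSpec]
      · rw [List.foldl_cons, show stepc h (some (i-1), flag) (i, h) = (some ((i+1)-1), flag) by
          simp [stepc], (ih (i+1) flag).2.1]
        simp
      · intro j hj
        rw [List.foldl_cons, show stepc h (some j, flag) (i, h) = (some ((i+1)-1), true) by
          simp [stepc]; omega, (ih (i+1) true).2.1]
        simp
    · have hc' : (h == c) = false := by simp [hc]
      refine ⟨?_, ?_, ?_⟩
      · rw [List.foldl_cons, show stepc c (none, flag) (i, h) = (none, flag) by
          simp [stepc, hc], (ih (i+1) flag).1]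
        simp [loneSpec, hc']
      · rw [List.foldl_cons, show stepc c (some (i-1), flag) (i, h) = (some (i-1), flag) by
          simp [stepc, hc]]
        rw [(ih (i+1) flag).2.2 (i-1) (by omega)]
        simp [hc', Ne.symm hc]
      · intro j hj
        rw [List.foldl_cons, show stepc c (some j, flag) (i, h) = (some j, flag) by
          simp [stepc, hc]]
        rw [(ih (i+1) flag).2.2 j (by omega)]
        simp [Ne.symm hc]

lemma finalSet_contains (l : List Char) (c : Char) :
    PySem.Set.contains ((PySem.List.enumerate l 0).foldl solutionAltStep
      (PySem.Dict.empty, PySem.Set.empty)).2 c = loneSpec c l := by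
  have hp := congrArg Prod.snd (projB c (PySem.List.enumerate l 0) PySem.Dict.empty PySem.Set.empty)
  simp only at hp
  rw [hp]
  rw [show ((PySem.Dict.empty : PySem.Dict Char Int).get? c,
      PySem.Set.contains (PySem.Set.empty : PySem.Set Char) c) = ((none : Option Int), false) by
    simp [PySem.Dict.get?_empty, PySem.Set.contains, PySem.Set.empty]]
  rw [(auto_spec c l 0 false).1]
  simp

-- ===== VERDICT (by name: the statement is the Claim_ definition above) =====
theorem solution_spec : Claim_equal_solution := by
  intro s _
  unfold Spec_solution solution solution_alt
  have hfun : (fun (answer : List Char) (char : Char) =>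
      let first_idx := PySem.Str.find s (String.singleton char)
      if first_idx = -1 then answer
      else if solutionInner s char
              (PySem.List.pyRange (first_idx + 1) (PySem.Str.len s) 1) first_idx
        then answer ++ [char] else answer)
      = fun answer char => if loneSpec char s.toList then answer ++ [char] else answer := by
    funext ans ch
    rw [← charA_eq s ch]
    split_ifs <;> simp_all
  rw [hfun]
  simp only [foldl_ite_append, List.nil_append, finalSet_contains]
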